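-- pv_equiv track=rewrite | github.com/Hopertz/CodingInterviewPrep | Square of Zeroes.py | precomputeNumOfZeroes
-- ===== SOURCE A (Python) =====
-- def precomputeNumOfZeroes(matrix):
--     infoMatrix = [[x for x in row] for row in matrix]
--     n = len(matrix)
--     for row in range(n):
--         for col in range(n):
--             numZeroes = 1 if matrix[row][col] == 0 else 0
--             infoMatrix[row][col] = {
--                 "numZeroesBelow": numZeroes,
--                 "numZeroesRight": numZeroes,
--             }
--     lastIdx = len(matrix) - 1
--     for row in reversed(range(n)):
--         for col in reversed(range(n)):
--             if matrix[row][col] == 1: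
--                 continue
--             if row < lastIdx:
--                 infoMatrix[row][col]["numZeroesBelow"] += infoMatrix[row + 1][col]["numZeroesBelow"]
--             if col < lastIdx:
--                 infoMatrix[row][col]["numZeroesRight"] += infoMatrix[row][col + 1]["numZeroesRight"]
--     return infoMatrix
-- ===== SOURCE B (Python) =====
-- def precomputeNumOfZeroes(matrix):
--     n = len(matrix)
--
--     def countDown(row, col):
--         if matrix[row][col] == 1:
--             return 0
--         total = 0
--         for r in range(row, n):
--             v = matrix[r][col]
--             if v == 1:
--                 break
--             if v == 0:
--                 total += 1
--         return total
--
--     def countRight(row, col):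
--         if matrix[row][col] == 1:
--             return 0
--         total = 0
--         for c in range(col, n):
--             v = matrix[row][c]
--             if v == 1:
--                 break
--             if v == 0:
--                 total += 1
--         return total
--
--     result = []
--     for r, row in enumerate(matrix):
--         newRow = [x for x in row]
--         for c in range(n):
--             newRow[c] = {"numZeroesBelow": countDown(r, c),
--                          "numZeroesRight": countRight(r, c)}
--         result.append(newRow)
--     return result
-- ===== Notes on version B (the rewrite author's own statement) =====
-- stated objective: alternative
-- what changed: Replaces A's two-pass mutable dynamic programming (initialize a grid of dicts, then accumulate suffix counts in reverse in place) with a direct per-cell definition: each cell independently scans downward and rightward counting zeroes until the first 1, with no shared DP table and no reversed traversal.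
import Mathlib
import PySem

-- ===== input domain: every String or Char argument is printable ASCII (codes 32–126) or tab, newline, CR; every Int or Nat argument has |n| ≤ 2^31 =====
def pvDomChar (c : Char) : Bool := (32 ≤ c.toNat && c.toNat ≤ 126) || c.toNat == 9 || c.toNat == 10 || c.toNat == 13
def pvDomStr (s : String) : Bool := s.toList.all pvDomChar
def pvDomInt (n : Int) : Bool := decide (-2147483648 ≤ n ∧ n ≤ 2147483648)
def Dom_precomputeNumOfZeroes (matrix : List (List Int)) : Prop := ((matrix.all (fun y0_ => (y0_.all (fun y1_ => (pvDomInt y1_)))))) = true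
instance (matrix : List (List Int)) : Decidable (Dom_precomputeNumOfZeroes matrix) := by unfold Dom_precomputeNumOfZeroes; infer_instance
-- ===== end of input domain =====

-- B replaces A's init-then-mutate reverse DP over a shared 2D table by an independent
-- per-cell downward/rightward zero-counting scan (objective: alternative; B is O(n^3)).


-- ===== PORT A =====
-- matrix[r] / matrix[r][c]; exact on Pre_ (indices used are always in range there, so the
-- getD defaults are never taken)
def pvGetRow (g : List (List (List (String × Int)))) (r : Int) : List (List (String × Int)) :=
  (PySem.List.pyGet? g r).getD []

def pvMatGet (m : List (List Int)) (r c : Int) : Int :=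
  (PySem.List.pyGet? ((PySem.List.pyGet? m r).getD []) c).getD 0

-- infoMatrix[row][col] = cell
def pvSet2 (g : List (List (List (String × Int)))) (r c : Int) (cell : List (String × Int)) :
    List (List (List (String × Int))) :=
  PySem.List.pySetD g r (PySem.List.pySetD (pvGetRow g r) c cell)

-- infoMatrix[row][col], a dict
def pvCell (g : List (List (List (String × Int)))) (r c : Int) : PySem.Dict String Int :=
  PySem.Dict.mk ((PySem.List.pyGet? (pvGetRow g r) c).getD [])

def precomputeNumOfZeroes (matrix : List (List Int)) : List (List (List (String × Int))) :=
  -- the initial int copy of matrix is represented by [] placeholder cells: on Pre_ every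
  -- placeholder is overwritten by the first double loop before it is ever read
  let infoMatrix0 : List (List (List (String × Int))) :=
    matrix.map (fun row => row.map (fun _ => ([] : List (String × Int))))
  let n : Int := matrix.length
  let infoMatrix1 :=
    (PySem.List.pyRange 0 n 1).foldl (fun g row =>
      (PySem.List.pyRange 0 n 1).foldl (fun g col =>
        let numZeroes : Int := if pvMatGet matrix row col == 0 then 1 else 0
        pvSet2 g row col
          (((PySem.Dict.empty.insert "numZeroesBelow" numZeroes).insert
              "numZeroesRight" numZeroes).items)) g) infoMatrix0
  let lastIdx : Int := (matrix.length : Int) - 1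
  (PySem.List.pyRange 0 n 1).reverse.foldl (fun g row =>
    (PySem.List.pyRange 0 n 1).reverse.foldl (fun g col =>
      if pvMatGet matrix row col == 1 then g
      else
        let g1 :=
          if row < lastIdx then
            pvSet2 g row col
              (((pvCell g row col).modify "numZeroesBelow" 0
                  (· + (pvCell g (row + 1) col).getD "numZeroesBelow" 0)).items)
          else g
        let g2 :=
          if col < lastIdx then
            pvSet2 g1 row col
              (((pvCell g1 row col).modify "numZeroesRight" 0
                  (· + (pvCell g1 row (col + 1)).getD "numZeroesRight" 0)).items)
        else g1
        g2) g) infoMatrix1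

-- ===== PORT B =====
-- B-side read of matrix[r][c]; exact on Pre_ (every index B reads is in range there)
def pvBGet (matrix : List (List Int)) (r c : Int) : Int :=
  PySem.List.pyGetD (PySem.List.pyGetD matrix r []) c 0

-- body of Source B's 'for … : if v == 1: break; if v == 0: total += 1' — the Bool is the
-- break flag, the Int is total
def pvScanStep (get : Int → Int) (st : Bool × Int) (i : Int) : Bool × Int :=
  if st.1 then st
  else
    let v := get i
    if v == 1 then (true, st.2)
    else if v == 0 then (false, st.2 + 1)
    else (false, st.2)

-- countDown(row, col) of Source B
def pvCountDown (matrix : List (List Int)) (n : Int) (row col : Int) : Int :=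
  if pvBGet matrix row col == 1 then 0
  else ((PySem.List.pyRange row n 1).foldl
      (pvScanStep (fun r => pvBGet matrix r col)) (false, 0)).2

-- countRight(row, col) of Source B
def pvCountRight (matrix : List (List Int)) (n : Int) (row col : Int) : Int :=
  if pvBGet matrix row col == 1 then 0
  else ((PySem.List.pyRange col n 1).foldl
      (pvScanStep (fun c => pvBGet matrix row c)) (false, 0)).2

-- Source B's 'newRow = [x for x in row]' copy is represented by [] placeholder cells: on
-- Pre_ every entry is overwritten by the column loop before the row is returned
def precomputeNumOfZeroes_alt (matrix : List (List Int)) : List (List (List (String × Int))) :=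
  let n : Int := matrix.length
  (PySem.List.enumerate matrix).foldl (fun result rrow =>
    result ++ [(PySem.List.pyRange 0 n 1).foldl
      (fun newRow c => PySem.List.pySetD newRow c
        [("numZeroesBelow", pvCountDown matrix n rrow.1 c),
         ("numZeroesRight", pvCountRight matrix n rrow.1 c)])
      (rrow.2.map (fun _ => ([] : List (String × Int))))]) []

-- ===== PRECONDITION & SPEC =====
-- Pre_ excludes ragged matrices: on a row shorter than len(matrix) both versions raise
-- IndexError, and on a row longer than len(matrix) A returns a list still containing raw
-- ints past column n-1, which is not a value of the declared type.
def Pre_precomputeNumOfZeroes (matrix : List (List Int)) : Prop :=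
  ∀ row ∈ matrix, row.length = matrix.length
instance (matrix : List (List Int)) : Decidable (Pre_precomputeNumOfZeroes matrix) := by
  unfold Pre_precomputeNumOfZeroes; infer_instance

def pvWitness_precomputeNumOfZeroes : List (List Int) := [[0, 1, 0], [2, 0, 0], [0, 0, 1]]

def Spec_precomputeNumOfZeroes (matrix : List (List Int)) (out : List (List (List (String × Int)))) : Prop := out = precomputeNumOfZeroes_alt matrix
instance (matrix : List (List Int)) (out : List (List (List (String × Int)))) : Decidable (Spec_precomputeNumOfZeroes matrix out) := by unfold Spec_precomputeNumOfZeroes; infer_instance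

-- ===== CLAIM (what is proved, stated in full; the proofs are below) =====
def Claim_equal_precomputeNumOfZeroes : Prop := ∀ (matrix : List (List Int)), Dom_precomputeNumOfZeroes matrix → Pre_precomputeNumOfZeroes matrix → Spec_precomputeNumOfZeroes matrix (precomputeNumOfZeroes matrix)


-- ===== LEMMAS AND PROOFS =====

-- reference recursion: one row, processed from the left but with the right-count threaded
-- back from the right; returns (cells, numZeroesBelow list, numZeroesRight of head cell)
def refRow : List Int → List Int → List (List (String × Int)) × List Int × Int
  | [], _ => ([], [], 0)
  | _ :: _, [] => ([], [], 0)
  | v :: vs, bu :: bs =>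
    let (cs, nbs, right) := refRow vs bs
    if v == 1 then
      ([("numZeroesBelow", (0:Int)), ("numZeroesRight", (0:Int))] :: cs, (0:Int) :: nbs, 0)
    else
      let base : Int := if v == 0 then 1 else 0
      ([("numZeroesBelow", base + bu), ("numZeroesRight", base + right)] :: cs,
        (base + bu) :: nbs, base + right)

-- reference recursion over the rows, bottom-up
def refGrid (n : Nat) : List (List Int) → List (List (List (String × Int))) × List Int
  | [] => ([], List.replicate n 0)
  | vals :: rest =>
    let (rows, below) := refGrid n rest
    let (cs, nbs, _) := refRow vals below
    (cs :: rows, nbs)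

def pvInitCellL (v : Int) : List (String × Int) :=
  [("numZeroesBelow", if v == 0 then (1:Int) else 0),
   ("numZeroesRight", if v == 0 then (1:Int) else 0)]

-- numZeroesBelow / numZeroesRight fields of a final cell
def rrB (v bu : Int) : Int := if v == 1 then 0 else (if v == 0 then 1 else 0) + bu
def rrR (v right : Int) : Int := if v == 1 then 0 else (if v == 0 then 1 else 0) + right

theorem refRow_cons (v bu : Int) (vs bs : List Int) :
    refRow (v :: vs) (bu :: bs) =
      ([("numZeroesBelow", rrB v bu), ("numZeroesRight", rrR v (refRow vs bs).2.2)] :: (refRow vs bs).1,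
        rrB v bu :: (refRow vs bs).2.1, rrR v (refRow vs bs).2.2) := by
  rcases h : refRow vs bs with ⟨cs, nbs, right⟩
  simp only [refRow, h, rrB, rrR]
  by_cases h1 : v == 1 <;> simp [h1]

theorem refRow_len_cells (vs : List Int) : ∀ bs : List Int,
    (refRow vs bs).1.length = min vs.length bs.length := by
  induction vs with
  | nil => intro bs; simp [refRow]
  | cons v vs ih =>
    intro bs
    cases bs with
    | nil => simp [refRow]
    | cons bu bs =>
      rw [refRow_cons]
      simp [ih bs]

theorem refRow_len_nbs (vs : List Int) : ∀ bs : List Int,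
    (refRow vs bs).2.1.length = min vs.length bs.length := by
  induction vs with
  | nil => intro bs; simp [refRow]
  | cons v vs ih =>
    intro bs
    cases bs with
    | nil => simp [refRow]
    | cons bu bs =>
      rw [refRow_cons]
      simp [ih bs]

theorem refGrid_cons (n : Nat) (vals : List Int) (rest : List (List Int)) :
    refGrid n (vals :: rest) =
      ((refRow vals (refGrid n rest).2).1 :: (refGrid n rest).1,
        (refRow vals (refGrid n rest).2).2.1) := by
  rcases hG : refGrid n rest with ⟨rows, below⟩
  rcases hR : refRow vals below with ⟨cs, nbs, right⟩
  simp [refGrid, hG, hR]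

theorem refGrid_len_rows (n : Nat) (rows : List (List Int)) :
    (refGrid n rows).1.length = rows.length := by
  induction rows with
  | nil => simp [refGrid]
  | cons vals rest ih => rw [refGrid_cons]; simp [ih]

theorem refGrid_len_snd (n : Nat) (rows : List (List Int))
    (h : ∀ r ∈ rows, r.length = n) : (refGrid n rows).2.length = n := by
  induction rows with
  | nil => simp [refGrid]
  | cons vals rest ih =>
    rw [refGrid_cons, refRow_len_nbs]
    have h1 : vals.length = n := h vals (by simp)
    have h2 := ih (fun r hr => h r (by simp [hr]))
    omega

theorem set_mid {α : Type} (pre : List α) (k : Nat) (hpre : pre.length = k) (a x : α)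
    (suf : List α) : (pre ++ a :: suf).set k x = pre ++ x :: suf := by
  subst hpre
  rw [List.set_append_right _ _ (le_refl _), Nat.sub_self, List.set_cons_zero]

-- ---- B-side reference: per-cell scan counts ----

-- number of zeroes until the first 1 (exclusive), scanning left to right
def rowScan : List Int → Int
  | [] => 0
  | v :: vs => if v == 1 then 0 else (if v == 0 then 1 else 0) + rowScan vs

theorem scan_stop (get : Int → Int) : ∀ (l : List Int) (t : Int),
    l.foldl (pvScanStep get) (true, t) = (true, t) := by
  intro l
  induction l with
  | nil => intro t; rfl
  | cons x xs ih => intro t; simp only [List.foldl_cons, pvScanStep, if_pos]; exact ih t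

theorem scan_go (get : Int → Int) : ∀ (k : Nat) (c n : Int), c + k = n → ∀ t : Int,
    ((PySem.List.pyRange c n 1).foldl (pvScanStep get) (false, t)).2
      = t + rowScan ((PySem.List.pyRange c n 1).map get) := by
  intro k
  induction k with
  | zero =>
    intro c n hc t
    rw [PySem.List.pyRange_one_eq_nil (by omega)]
    simp [rowScan]
  | succ k ih =>
    intro c n hc t
    rw [PySem.List.pyRange_one_cons (by omega)]
    simp only [List.foldl_cons, List.map_cons]
    by_cases h1 : get c == 1
    · have hstep : pvScanStep get (false, t) c = (true, t) := by
        simp [pvScanStep, h1]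
      rw [hstep, scan_stop]
      simp [rowScan, h1]
    · by_cases h0 : get c == 0
      · have hstep : pvScanStep get (false, t) c = (false, t + 1) := by
          simp [pvScanStep, h1, h0]
        rw [hstep, ih (c + 1) n (by omega) (t + 1)]
        simp [rowScan, h1, h0]
        ring
      · have hstep : pvScanStep get (false, t) c = (false, t) := by
          simp [pvScanStep, h1, h0]
        rw [hstep, ih (c + 1) n (by omega) t]
        simp [rowScan, h1, h0]

-- absorbing the 'if cell == 1 then 0' guard: rowScan of a list starting with a 1 is 0
theorem rowScan_head_one (v : Int) (vs : List Int) (h : v = 1) :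
    rowScan (v :: vs) = 0 := by simp [rowScan, h]

theorem countRight_eq (matrix : List (List Int))
    (hpre : ∀ row ∈ matrix, row.length = matrix.length)
    (r c : Nat) (hr : r < matrix.length) (hc : c < matrix.length) :
    pvCountRight matrix (matrix.length : Int) (r : Int) (c : Int)
      = rowScan (matrix[r].drop c) := by
  have hrow : PySem.List.pyGetD matrix (r : Int) [] = matrix[r] := by
    rw [PySem.List.pyGetD_natCast, List.getD_eq_getElem matrix [] hr]
  have hrl : matrix[r].length = matrix.length := hpre matrix[r] (List.getElem_mem hr)
  have hget : (fun i => pvBGet matrix (r : Int) i)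
      = fun i => PySem.List.pyGetD matrix[r] i 0 := by
    funext i; simp [pvBGet, hrow]
  have hmap : (PySem.List.pyRange (c : Int) (matrix.length : Int) 1).map
      (fun i => pvBGet matrix (r : Int) i) = matrix[r].drop c := by
    rw [hget, show (matrix.length : Int) = (matrix[r].length : Int) by rw [hrl]]
    rw [PySem.List.map_pyGetD_pyRange' matrix[r] 0 (Int.natCast_nonneg c)]
    simp
  have hfold := scan_go (fun i => pvBGet matrix (r : Int) i) (matrix.length - c)
    (c : Int) (matrix.length : Int) (by omega) 0
  rw [hmap, zero_add] at hfold
  have hcell : pvBGet matrix (r : Int) (c : Int) = matrix[r].getD c 0 := by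
    simp [pvBGet, hrow, PySem.List.pyGetD_natCast]
  have hdrop : matrix[r].drop c = matrix[r][c]'(by omega) :: matrix[r].drop (c + 1) :=
    (List.getElem_cons_drop (by omega)).symm
  unfold pvCountRight
  rw [hfold, hcell]
  by_cases h1 : matrix[r].getD c 0 == 1
  · rw [if_pos h1, hdrop, rowScan_head_one]
    rw [List.getD_eq_getElem matrix[r] 0 (by omega)] at h1
    exact of_decide_eq_true h1
  · rw [if_neg h1]

theorem countDown_eq (matrix : List (List Int))
    (hpre : ∀ row ∈ matrix, row.length = matrix.length)
    (r c : Nat) (hr : r < matrix.length) (_hc : c < matrix.length) :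
    pvCountDown matrix (matrix.length : Int) (r : Int) (c : Int)
      = rowScan ((matrix.drop r).map (fun row => row.getD c 0)) := by
  have hrl : matrix[r].length = matrix.length := hpre matrix[r] (List.getElem_mem hr)
  have hmap : (PySem.List.pyRange (r : Int) (matrix.length : Int) 1).map
      (fun i => pvBGet matrix i (c : Int))
      = (matrix.drop r).map (fun row => row.getD c 0) := by
    have hcomp : (fun i => pvBGet matrix i (c : Int))
        = (fun row => PySem.List.pyGetD row (c : Int) 0)
            ∘ (fun i => PySem.List.pyGetD matrix i []) := by
      funext i; simp [pvBGet, Function.comp]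
    rw [hcomp, ← List.map_map]
    rw [PySem.List.map_pyGetD_pyRange' matrix [] (Int.natCast_nonneg r)]
    simp only [Int.toNat_natCast]
    apply List.map_congr_left
    intro row _
    rw [PySem.List.pyGetD_natCast]
  have hfold := scan_go (fun i => pvBGet matrix i (c : Int)) (matrix.length - r)
    (r : Int) (matrix.length : Int) (by omega) 0
  rw [hmap, zero_add] at hfold
  have hrowr : PySem.List.pyGetD matrix (r : Int) [] = matrix[r] := by
    rw [PySem.List.pyGetD_natCast, List.getD_eq_getElem matrix [] hr]
  have hcell : pvBGet matrix (r : Int) (c : Int) = matrix[r].getD c 0 := by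
    simp [pvBGet, hrowr, PySem.List.pyGetD_natCast]
  have hdropm : matrix.drop r = matrix[r] :: matrix.drop (r + 1) :=
    (List.getElem_cons_drop hr).symm
  unfold pvCountDown
  rw [hfold, hcell]
  by_cases h1 : matrix[r].getD c 0 == 1
  · rw [if_pos h1, hdropm, List.map_cons, rowScan_head_one]
    exact of_decide_eq_true h1
  · rw [if_neg h1]

-- ---- connecting refRow/refGrid cells to the scan counts ----

theorem refRow_right (vs : List Int) : ∀ bs : List Int, vs.length ≤ bs.length →
    (refRow vs bs).2.2 = rowScan vs := by
  induction vs with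
  | nil => intro bs h; simp [refRow, rowScan]
  | cons v vs ih =>
    intro bs h
    cases bs with
    | nil => simp at h
    | cons bu bs =>
      rw [refRow_cons]
      simp only [rrR, rowScan]
      rw [ih bs (by simpa using h)]

theorem refRow_nbs_getD (vs : List Int) : ∀ (bs : List Int) (c : Nat),
    c < vs.length → c < bs.length →
    (refRow vs bs).2.1.getD c 0 = rrB (vs.getD c 0) (bs.getD c 0) := by
  induction vs with
  | nil => intro bs c h1 h2; simp at h1
  | cons v vs ih =>
    intro bs c h1 h2
    cases bs with
    | nil => simp at h2
    | cons bu bs =>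
      rw [refRow_cons]
      cases c with
      | zero => simp
      | succ c =>
        simp only [List.getD_cons_succ]
        exact ih bs c (by simpa using h1) (by simpa using h2)

theorem refRow_cell (vs : List Int) : ∀ (bs : List Int), vs.length ≤ bs.length →
    ∀ (c : Nat), c < vs.length →
    (refRow vs bs).1[c]?
      = some [("numZeroesBelow", rrB (vs.getD c 0) (bs.getD c 0)),
              ("numZeroesRight", rowScan (vs.drop c))] := by
  induction vs with
  | nil => intro bs h c hc; simp at hc
  | cons v vs ih =>
    intro bs h c hc
    cases bs with
    | nil => simp at h
    | cons bu bs =>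
      rw [refRow_cons]
      cases c with
      | zero =>
        simp only [List.getElem?_cons_zero, List.getD_cons_zero, List.drop_zero,
          Option.some.injEq]
        rw [refRow_right vs bs (by simpa using h)]
        simp [rrR, rowScan]
      | succ c =>
        simp only [List.getElem?_cons_succ, List.getD_cons_succ, List.drop_succ_cons]
        exact ih bs (by simpa using h) c (by simpa using hc)

theorem refGrid_snd_getD (n : Nat) (rows : List (List Int))
    (h : ∀ row ∈ rows, row.length = n) (c : Nat) (hc : c < n) :
    (refGrid n rows).2.getD c 0 = rowScan (rows.map (fun row => row.getD c 0)) := by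
  induction rows with
  | nil =>
    simp only [refGrid, List.map_nil]
    rw [List.getD_eq_getElem _ 0 (by simpa using hc)]
    simp [rowScan]
  | cons vals rest ih =>
    have hv : vals.length = n := h vals (by simp)
    have hrest : ∀ row ∈ rest, row.length = n := fun r hr => h r (by simp [hr])
    rw [refGrid_cons]
    have hblen : (refGrid n rest).2.length = n := refGrid_len_snd n rest hrest
    rw [refRow_nbs_getD vals (refGrid n rest).2 c (by omega) (by omega)]
    rw [ih hrest]
    simp [List.map_cons, rowScan, rrB]

theorem refGrid_row_len (n : Nat) (rows : List (List Int))
    (h : ∀ row ∈ rows, row.length = n) :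
    ∀ (r : Nat), r < rows.length → ((refGrid n rows).1.getD r []).length = n := by
  induction rows with
  | nil => intro r hr; simp at hr
  | cons vals rest ih =>
    intro r hr
    have hv : vals.length = n := h vals (by simp)
    have hrest : ∀ row ∈ rest, row.length = n := fun row hrow => h row (by simp [hrow])
    have hblen : (refGrid n rest).2.length = n := refGrid_len_snd n rest hrest
    rw [refGrid_cons]
    cases r with
    | zero =>
      simp only [List.getD_cons_zero]
      rw [refRow_len_cells]
      omega
    | succ r =>
      simp only [List.getD_cons_succ]
      exact ih hrest r (by simpa using hr)

theorem refGrid_cell (n : Nat) (rows : List (List Int))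
    (h : ∀ row ∈ rows, row.length = n) :
    ∀ (r c : Nat), r < rows.length → c < n →
    ((refGrid n rows).1.getD r []).getD c []
      = [("numZeroesBelow", rowScan ((rows.drop r).map (fun row => row.getD c 0))),
         ("numZeroesRight", rowScan ((rows.getD r []).drop c))] := by
  induction rows with
  | nil => intro r c hr hc; simp at hr
  | cons vals rest ih =>
    intro r c hr hc
    have hv : vals.length = n := h vals (by simp)
    have hrest : ∀ row ∈ rest, row.length = n := fun row hrow => h row (by simp [hrow])
    have hblen : (refGrid n rest).2.length = n := refGrid_len_snd n rest hrest
    rw [refGrid_cons]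
    cases r with
    | zero =>
      simp only [List.getD_cons_zero, List.drop_zero, List.map_cons]
      rw [List.getD_eq_getElem?_getD,
        refRow_cell vals (refGrid n rest).2 (by omega) c (by omega)]
      rw [refGrid_snd_getD n rest hrest c hc]
      simp [rowScan, rrB]
    | succ r =>
      simp only [List.getD_cons_succ, List.drop_succ_cons]
      exact ih hrest r c (by simpa using hr) hc

-- one row of the initialization loop: successive writes at columns 0..m-1
theorem rowset {α : Type} (f : Int → α) : ∀ (m : Nat) (rw : List α), m ≤ rw.length →
    (PySem.List.pyRange 0 (m : Int) 1).foldl (fun acc c => PySem.List.pySetD acc c (f c)) rw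
      = (PySem.List.pyRange 0 (m : Int) 1).map f ++ rw.drop m := by
  intro m
  induction m with
  | zero =>
    intro rw h
    rw [Nat.cast_zero, PySem.List.pyRange_one_eq_nil (le_refl 0)]
    simp
  | succ m ih =>
    intro rw h
    have hcast : ((m + 1 : Nat) : Int) = (m : Int) + 1 := by push_cast; ring
    rw [hcast, PySem.List.pyRange_one_succ_right (by positivity)]
    rw [List.foldl_append, List.map_append, ih rw (by omega)]
    simp only [List.foldl_cons, List.foldl_nil, List.map_cons, List.map_nil]
    rw [PySem.List.pySetD_natCast]
    have hlen : ((PySem.List.pyRange 0 (m : Int) 1).map f).length = m := by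
      simp [PySem.List.length_pyRange_one]
    rw [List.set_append_right (s := (PySem.List.pyRange 0 (m : Int) 1).map f) m (f m) hlen.le]
    rw [hlen, Nat.sub_self]
    obtain ⟨x, hx⟩ : ∃ x, List.drop m rw = x :: List.drop (m + 1) rw :=
      ⟨_, (List.getElem_cons_drop (show m < rw.length by omega)).symm⟩
    rw [hx]
    simp

-- result.append(...) in a loop builds init ++ map
theorem foldl_append_singleton {α β : Type} (g : α → β) :
    ∀ (l : List α) (init : List β),
    l.foldl (fun acc x => acc ++ [g x]) init = init ++ l.map g := by
  intro l
  induction l with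
  | nil => intro init; simp
  | cons x xs ih => intro init; simp [ih]

theorem B_eq_ref (matrix : List (List Int))
    (h : ∀ row ∈ matrix, row.length = matrix.length) :
    precomputeNumOfZeroes_alt matrix = (refGrid matrix.length matrix).1 := by
  simp only [precomputeNumOfZeroes_alt]
  rw [foldl_append_singleton, List.nil_append,
    PySem.List.enumerate_eq_map_pyRange matrix [], List.map_map]
  apply List.ext_getElem
  · rw [List.length_map, PySem.List.length_pyRange_one, refGrid_len_rows]
    simp
  · intro r hrl hrr
    have hr : r < matrix.length := by rw [refGrid_len_rows] at hrr; exact hrr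
    have hrow := refGrid_row_len matrix.length matrix h r hr
    rw [List.getD_eq_getElem _ [] hrr] at hrow
    have hrlen : matrix[r].length = matrix.length := h matrix[r] (List.getElem_mem hr)
    simp only [List.getElem_map, PySem.List.getElem_pyRange_one, zero_add, Function.comp]
    rw [show PySem.List.pyGetD matrix ((r : Nat) : Int) [] = matrix[r] by
      rw [PySem.List.pyGetD_natCast, List.getD_eq_getElem matrix [] hr]]
    rw [rowset (fun c =>
        [("numZeroesBelow", pvCountDown matrix (matrix.length : Int) (r : Int) c),
         ("numZeroesRight", pvCountRight matrix (matrix.length : Int) (r : Int) c)])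
      matrix.length (matrix[r].map (fun _ => ([] : List (String × Int))))
      (by rw [List.length_map, hrlen])]
    rw [List.drop_eq_nil_of_le (by rw [List.length_map, hrlen]), List.append_nil]
    apply List.ext_getElem
    · simp only [List.length_map, PySem.List.length_pyRange_one]
      rw [hrow]
      omega
    · intro c hcl hcr
      have hc : c < matrix.length := by omega
      simp only [List.getElem_map, PySem.List.getElem_pyRange_one, zero_add]
      rw [countDown_eq matrix h r c hr hc, countRight_eq matrix h r c hr hc]
      have hcell := refGrid_cell matrix.length matrix h r c hr hc
      rw [List.getD_eq_getElem _ [] hrr, List.getD_eq_getElem _ [] hcr,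
        List.getD_eq_getElem matrix [] hr] at hcell
      exact hcell.symm

-- ---- A-side helpers ----

theorem cell_items (z : Int) :
    ((PySem.Dict.empty.insert "numZeroesBelow" z).insert "numZeroesRight" z).items
      = [("numZeroesBelow", z), ("numZeroesRight", z)] := rfl

theorem cell_getD_below (b r : Int) :
    (PySem.Dict.mk [("numZeroesBelow", b), ("numZeroesRight", r)]).getD "numZeroesBelow" 0 = b := rfl

theorem cell_getD_right (b r : Int) :
    (PySem.Dict.mk [("numZeroesBelow", b), ("numZeroesRight", r)]).getD "numZeroesRight" 0 = r := rfl

theorem cell_mod_below (b r d : Int) :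
    ((PySem.Dict.mk [("numZeroesBelow", b), ("numZeroesRight", r)]).modify "numZeroesBelow" 0 (· + d)).items
      = [("numZeroesBelow", b + d), ("numZeroesRight", r)] := rfl

theorem cell_mod_right (b r d : Int) :
    ((PySem.Dict.mk [("numZeroesBelow", b), ("numZeroesRight", r)]).modify "numZeroesRight" 0 (· + d)).items
      = [("numZeroesBelow", b), ("numZeroesRight", r + d)] := rfl

theorem pvGetRow_eq (g : List (List (List (String × Int)))) (r : Nat) (h : r < g.length) :
    pvGetRow g (r : Int) = g[r] := by
  simp [pvGetRow, PySem.List.pyGet?_ofNat g r h]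

theorem pvSet2_eq (g : List (List (List (String × Int)))) (r c : Nat) (h : r < g.length)
    (cell : List (String × Int)) :
    pvSet2 g (r : Int) (c : Int) cell = g.set r (g[r].set c cell) := by
  simp [pvSet2, pvGetRow_eq g r h, PySem.List.pySetD_natCast]

theorem pvCell_set_ne (g : List (List (List (String × Int)))) (r s : Nat) (hne : r ≠ s)
    (X : List (List (String × Int))) (c : Int) :
    pvCell (g.set r X) (s : Int) c = pvCell g (s : Int) c := by
  simp [pvCell, pvGetRow, PySem.List.pyGet?_natCast, List.getElem?_set_ne hne]

theorem matget (matrix : List (List Int)) (r c : Nat) (hr : r < matrix.length)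
    (hc : c < matrix[r].length) : pvMatGet matrix (r : Int) (c : Int) = matrix[r][c] := by
  simp [pvMatGet, PySem.List.pyGet?_ofNat matrix r hr, PySem.List.pyGet?_ofNat _ c hc]

-- the initialization inner loop only rewrites row r
theorem gridrow_fold (f : Int → List (String × Int)) (r : Nat) (m : Nat) :
    ∀ (g : List (List (List (String × Int)))) (hr : r < g.length),
    (PySem.List.pyRange 0 (m : Int) 1).foldl (fun acc c => pvSet2 acc (r : Int) c (f c)) g
      = g.set r ((PySem.List.pyRange 0 (m : Int) 1).foldl
          (fun acc c => PySem.List.pySetD acc c (f c)) (g[r]'hr)) := by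
  induction m with
  | zero =>
    intro g hr
    simp only [Nat.cast_zero, PySem.List.pyRange_one_eq_nil (le_refl 0), List.foldl_nil]
    exact (List.set_getElem_self hr).symm
  | succ m ih =>
    intro g hr
    have hcast : ((m + 1 : Nat) : Int) = (m : Int) + 1 := by push_cast; ring
    rw [hcast, PySem.List.pyRange_one_succ_right (by positivity)]
    rw [List.foldl_append, List.foldl_append, ih g hr]
    simp only [List.foldl_cons, List.foldl_nil]
    rw [PySem.List.pySetD_natCast]
    have hr' : r < (g.set r ((PySem.List.pyRange 0 (m:Int) 1).foldl (fun acc c => PySem.List.pySetD acc c (f c)) g[r])).length := by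
      simpa using hr
    rw [pvSet2_eq _ r m hr']
    simp [List.set_set]

-- the whole initialization double loop
theorem grid2_fold (n : Nat) (cellf : Int → Int → List (String × Int)) :
    ∀ (m : Nat) (g : List (List (List (String × Int)))), m ≤ g.length →
    (∀ i (h : i < g.length), (g[i]).length = n) →
    (PySem.List.pyRange 0 (m : Int) 1).foldl (fun acc row =>
        (PySem.List.pyRange 0 (n : Int) 1).foldl (fun acc2 col =>
          pvSet2 acc2 row col (cellf row col)) acc) g
      = (PySem.List.pyRange 0 (m : Int) 1).map
          (fun r => (PySem.List.pyRange 0 (n : Int) 1).map (cellf r)) ++ g.drop m := by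
  intro m
  induction m with
  | zero =>
    intro g hm hrows
    rw [Nat.cast_zero, PySem.List.pyRange_one_eq_nil (le_refl 0)]
    simp
  | succ m ih =>
    intro g hm hrows
    have hcast : ((m + 1 : Nat) : Int) = (m : Int) + 1 := by push_cast; ring
    rw [hcast, PySem.List.pyRange_one_succ_right (by positivity), List.foldl_append,
      List.map_append, ih g (by omega) hrows]
    simp only [List.foldl_cons, List.foldl_nil, List.map_cons, List.map_nil]
    set pre := (PySem.List.pyRange 0 (m : Int) 1).map
        (fun r => (PySem.List.pyRange 0 (n : Int) 1).map (cellf r)) with hpre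
    have hprelen : pre.length = m := by simp [hpre, PySem.List.length_pyRange_one]
    have hglen : (pre ++ g.drop m).length = g.length := by simp [hprelen]; omega
    rw [gridrow_fold _ m n (pre ++ g.drop m) (by omega)]
    have hgm : (pre ++ g.drop m)[m] = g[m]'(by omega) := by
      rw [List.getElem_append_right (by omega)]
      simp [hprelen]
    rw [hgm, rowset _ n _ (by rw [hrows m (by omega)])]
    have hdrop : List.drop n (g[m]'(by omega)) = [] :=
      List.drop_eq_nil_of_le (by rw [hrows m (by omega)])
    rw [hdrop, List.append_nil]
    rw [List.set_append_right (s := pre) m _ hprelen.le, hprelen, Nat.sub_self]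
    obtain ⟨x, hx⟩ : ∃ x, List.drop m g = x :: List.drop (m + 1) g :=
      ⟨_, (List.getElem_cons_drop (show m < g.length by omega)).symm⟩
    rw [hx]
    simp

theorem pvCell_eq2 (g : List (List (List (String × Int)))) (r c : Nat)
    (RW : List (List (String × Int))) (cell : List (String × Int))
    (h1 : g[r]? = some RW) (h2 : RW[c]? = some cell) :
    pvCell g (r : Int) (c : Int) = PySem.Dict.mk cell := by
  simp [pvCell, pvGetRow, PySem.List.pyGet?_natCast, h1, h2]

theorem pvSet2_eq2 (g : List (List (List (String × Int)))) (r c : Nat)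
    (RW : List (List (String × Int))) (h1 : g[r]? = some RW) (cell : List (String × Int)) :
    pvSet2 g (r : Int) (c : Int) cell = g.set r (RW.set c cell) := by
  simp [pvSet2, pvGetRow, PySem.List.pyGet?_natCast, h1, PySem.List.pySetD_natCast]

theorem refRow_getD_below (vs : List Int) : ∀ (bs : List Int) (c : Nat),
    c < vs.length → c < bs.length →
    (PySem.Dict.mk ((refRow vs bs).1.getD c [])).getD "numZeroesBelow" 0
      = (refRow vs bs).2.1.getD c 0 := by
  induction vs with
  | nil => intro bs c h1 h2; simp at h1
  | cons v t ih =>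
    intro bs c h1 h2
    cases bs with
    | nil => simp at h2
    | cons bu t2 =>
      rw [refRow_cons]
      cases c with
      | zero => simp only [List.getD_cons_zero]; exact cell_getD_below _ _
      | succ c =>
        simp only [List.getD_cons_succ]
        exact ih t2 c (by simpa using h1) (by simpa using h2)

theorem colLoop (matrix : List (List Int)) (r : Nat) (vals below : List Int)
    (hrn : r < matrix.length) (hv : vals.length = matrix.length)
    (hb : below.length = matrix.length)
    (hval : ∀ c : Nat, c < matrix.length → pvMatGet matrix (r : Int) (c : Int) = vals.getD c 0)
    (g : List (List (List (String × Int)))) (hg : g.length = matrix.length)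
    (hrow : g[r]? = some (vals.map pvInitCellL))
    (hbelow : (r : Int) < (matrix.length : Int) - 1 → ∀ c : Nat, c < matrix.length →
      (pvCell g ((r : Int) + 1) (c : Int)).getD "numZeroesBelow" 0 = below.getD c 0)
    (hb0 : ¬((r : Int) < (matrix.length : Int) - 1) → below = List.replicate matrix.length 0) :
    ∀ (k c : Nat), c + k = matrix.length →
    (PySem.List.pyRange (c : Int) (matrix.length : Int) 1).reverse.foldl
      (fun g col =>
        if pvMatGet matrix (r : Int) col == 1 then g
        else
          let g1 := if (r : Int) < (matrix.length : Int) - 1 then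
              pvSet2 g (r : Int) col (((pvCell g (r : Int) col).modify "numZeroesBelow" 0
                (· + (pvCell g ((r : Int) + 1) col).getD "numZeroesBelow" 0)).items)
            else g
          let g2 := if col < (matrix.length : Int) - 1 then
              pvSet2 g1 (r : Int) col (((pvCell g1 (r : Int) col).modify "numZeroesRight" 0
                (· + (pvCell g1 (r : Int) (col + 1)).getD "numZeroesRight" 0)).items)
            else g1
          g2) g
      = g.set r ((vals.map pvInitCellL).take c ++ (refRow (vals.drop c) (below.drop c)).1) := by
  intro k
  induction k with
  | zero =>
    intro c hc
    rw [PySem.List.pyRange_one_eq_nil (by omega)]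
    simp only [List.reverse_nil, List.foldl_nil]
    rw [List.drop_eq_nil_of_le (by omega), List.drop_eq_nil_of_le (by omega)]
    rw [List.take_of_length_le (by rw [List.length_map]; omega)]
    simp only [refRow, List.append_nil]
    have hrl : r < g.length := by omega
    have hgr : (vals.map pvInitCellL) = g[r]'hrl := by
      have h := hrow
      rw [List.getElem?_eq_getElem hrl] at h
      exact (Option.some.inj h).symm
    rw [hgr, List.set_getElem_self]
  | succ k ih =>
    intro c hc
    have hcN : c < matrix.length := by omega
    rw [PySem.List.pyRange_one_cons (by omega)]
    rw [List.reverse_cons, List.foldl_append]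
    rw [show ((c : Int) + 1) = ((c + 1 : Nat) : Int) by push_cast; ring]
    rw [ih (c + 1) (by omega)]
    have hvc : c < vals.length := by omega
    have hbc : c < below.length := by omega
    have hvde : vals.drop c = vals[c] :: vals.drop (c + 1) := (List.getElem_cons_drop hvc).symm
    have hbde : below.drop c = below[c] :: below.drop (c + 1) := (List.getElem_cons_drop hbc).symm
    rw [hvde, hbde, refRow_cons]
    set S := (refRow (vals.drop (c + 1)) (below.drop (c + 1))).1 with hS
    set rS := (refRow (vals.drop (c + 1)) (below.drop (c + 1))).2.2 with hrS
    set R1 := (vals.map pvInitCellL).take (c + 1) ++ S with hR1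
    simp only [List.foldl_cons, List.foldl_nil]
    have hrgl : r < g.length := by omega
    have hG1r : (g.set r R1)[r]? = some R1 := List.getElem?_set_self (by simpa using hrgl)
    have htkc : ((vals.map pvInitCellL).take c).length = c := by
      rw [List.length_take, List.length_map]; omega
    have hR1split : R1 = (vals.map pvInitCellL).take c ++ pvInitCellL vals[c] :: S := by
      rw [hR1, List.take_add_one, List.getElem?_map, List.getElem?_eq_getElem hvc]
      simp
    have hR1c : R1[c]? = some (pvInitCellL vals[c]) := by
      rw [hR1split, List.getElem?_append_right htkc.le, htkc, Nat.sub_self]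
      simp
    rw [hval c hcN, List.getD_eq_getElem vals 0 hvc]
    by_cases hv1 : vals[c] = 1
    · rw [if_pos (by simp [hv1])]
      rw [hR1split]
      simp [rrB, rrR, hv1, pvInitCellL]
    · rw [if_neg (by simp [hv1])]
      have hrrB : rrB vals[c] below[c]
          = (if vals[c] == 0 then (1 : Int) else 0) + below[c] := by
        simp [rrB, hv1]
      have hrrR : rrR vals[c] rS = (if vals[c] == 0 then (1 : Int) else 0) + rS := by
        simp [rrR, hv1]
      -- first (numZeroesBelow) phase: the grid becomes g.set r (take c ++ CM :: S)
      -- with CM = [(below, rrB v bu), (right, z)]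
      have hbelowphase :
          (if (r : Int) < (matrix.length : Int) - 1 then
              pvSet2 (g.set r R1) (r : Int) (c : Int)
                (((pvCell (g.set r R1) (r : Int) (c : Int)).modify "numZeroesBelow" 0
                  (· + (pvCell (g.set r R1) ((r : Int) + 1) (c : Int)).getD "numZeroesBelow" 0)).items)
            else (g.set r R1))
          = g.set r ((vals.map pvInitCellL).take c ++
              [("numZeroesBelow", rrB vals[c] below[c]),
               ("numZeroesRight", if vals[c] == 0 then (1 : Int) else 0)] :: S) := by
        by_cases hrlt : (r : Int) < (matrix.length : Int) - 1
        · rw [if_pos hrlt]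
          have hcell1 : pvCell (g.set r R1) (r : Int) (c : Int)
              = PySem.Dict.mk (pvInitCellL vals[c]) := pvCell_eq2 _ r c R1 _ hG1r hR1c
          have hcast1 : ((r : Int) + 1) = ((r + 1 : Nat) : Int) := by push_cast; ring
          have hreadb : (pvCell (g.set r R1) ((r : Int) + 1) (c : Int)).getD "numZeroesBelow" 0
              = below[c] := by
            rw [hcast1, pvCell_set_ne g r (r + 1) (by omega) R1 (c : Int)]
            rw [← hcast1, hbelow hrlt c hcN, List.getD_eq_getElem below 0 hbc]
          rw [hcell1, hreadb]
          have hmod : ((PySem.Dict.mk (pvInitCellL vals[c])).modify "numZeroesBelow" 0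
              (· + below[c])).items
              = [("numZeroesBelow", (if vals[c] == 0 then (1 : Int) else 0) + below[c]),
                 ("numZeroesRight", if vals[c] == 0 then (1 : Int) else 0)] := by
            simp only [pvInitCellL]
            exact cell_mod_below _ _ _
          rw [hmod, pvSet2_eq2 _ r c R1 hG1r, List.set_set, hR1split, set_mid _ c htkc, hrrB]
        · rw [if_neg hrlt]
          have hbu0 : below[c] = 0 := by
            rw [List.getElem_of_eq (hb0 hrlt) hbc]
            exact List.getElem_replicate _
          rw [hR1split, hrrB, hbu0]
          simp [pvInitCellL]
      rw [hbelowphase]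
      set CM := [("numZeroesBelow", rrB vals[c] below[c]),
                 ("numZeroesRight", if vals[c] == 0 then (1 : Int) else 0)] with hCM
      set RowX := (vals.map pvInitCellL).take c ++ CM :: S with hRowX
      have hXr : (g.set r RowX)[r]? = some RowX := List.getElem?_set_self (by simpa using hrgl)
      have hRowXc : RowX[c]? = some CM := by
        rw [hRowX, List.getElem?_append_right htkc.le, htkc, Nat.sub_self]
        simp
      by_cases hclt : (c : Int) < (matrix.length : Int) - 1
      · rw [if_pos hclt]
        have hc1N : c + 1 < matrix.length := by omega
        have hv1c : c + 1 < vals.length := by omega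
        have hb1c : c + 1 < below.length := by omega
        have hvde1 : vals.drop (c + 1) = vals[c + 1] :: vals.drop (c + 2) :=
          (List.getElem_cons_drop hv1c).symm
        have hbde1 : below.drop (c + 1) = below[c + 1] :: below.drop (c + 2) :=
          (List.getElem_cons_drop hb1c).symm
        have hrSeq : rS = rrR vals[c + 1] (refRow (vals.drop (c + 2)) (below.drop (c + 2))).2.2 := by
          rw [hrS, hvde1, hbde1, refRow_cons]
        have hScons : S = [("numZeroesBelow", rrB vals[c + 1] below[c + 1]),
            ("numZeroesRight", rrR vals[c + 1] (refRow (vals.drop (c + 2)) (below.drop (c + 2))).2.2)]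
            :: (refRow (vals.drop (c + 2)) (below.drop (c + 2))).1 := by
          rw [hS, hvde1, hbde1, refRow_cons]
        have hRowXc1 : RowX[c + 1]? = some
            [("numZeroesBelow", rrB vals[c + 1] below[c + 1]),
             ("numZeroesRight", rrR vals[c + 1] (refRow (vals.drop (c + 2)) (below.drop (c + 2))).2.2)] := by
          rw [hRowX, List.getElem?_append_right (by omega), htkc]
          rw [show c + 1 - c = 1 by omega]
          rw [hScons]
          simp
        have hcellX : pvCell (g.set r RowX) (r : Int) (c : Int) = PySem.Dict.mk CM :=
          pvCell_eq2 _ r c RowX CM hXr hRowXc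
        have hreadr : (pvCell (g.set r RowX) (r : Int) ((c : Int) + 1)).getD "numZeroesRight" 0
            = rS := by
          rw [show ((c : Int) + 1) = ((c + 1 : Nat) : Int) by push_cast; ring]
          rw [pvCell_eq2 _ r (c + 1) RowX _ hXr hRowXc1]
          rw [cell_getD_right, hrSeq]
        rw [hcellX, hreadr, hCM, cell_mod_right, pvSet2_eq2 _ r c RowX hXr, List.set_set]
        rw [hRowX, set_mid _ c htkc, hrrR]
      · rw [if_neg hclt]
        have hrS0 : rS = 0 := by
          rw [hrS, List.drop_eq_nil_of_le (by omega)]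
          simp [refRow]
        rw [hRowX, hCM, hrrR, hrS0]
        simp

theorem init_map (matrix : List (List Int))
    (hpre : ∀ row ∈ matrix, row.length = matrix.length) :
    (PySem.List.pyRange 0 (matrix.length : Int) 1).map
      (fun r => (PySem.List.pyRange 0 (matrix.length : Int) 1).map
        (fun c => ((PySem.Dict.empty.insert "numZeroesBelow"
            (if pvMatGet matrix r c == 0 then (1 : Int) else 0)).insert
          "numZeroesRight" (if pvMatGet matrix r c == 0 then (1 : Int) else 0)).items))
      = matrix.map (fun row => row.map pvInitCellL) := by
  simp only [cell_items]
  show (PySem.List.pyRange 0 (matrix.length : Int) 1).map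
      (fun r => (PySem.List.pyRange 0 (matrix.length : Int) 1).map
        (fun c => pvInitCellL (pvMatGet matrix r c)))
      = matrix.map (fun row => row.map pvInitCellL)
  have hlens : ∀ i (h : i < matrix.length), matrix[i].length = matrix.length :=
    fun i h => hpre matrix[i] (List.getElem_mem h)
  have hin : ∀ ri ∈ PySem.List.pyRange 0 (matrix.length : Int) 1,
      (PySem.List.pyRange 0 (matrix.length : Int) 1).map
        (fun c => pvInitCellL (pvMatGet matrix ri c))
      = (PySem.List.pyGetD matrix ri []).map pvInitCellL := by
    intro ri hri
    rw [PySem.List.mem_pyRange_one] at hri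
    obtain ⟨rn, hrn, hreq⟩ : ∃ rn : Nat, rn < matrix.length ∧ ri = (rn : Int) :=
      ⟨ri.toNat, by omega, by omega⟩
    subst hreq
    have hroweq : PySem.List.pyGetD matrix (rn : Int) [] = matrix[rn] := by
      rw [PySem.List.pyGetD_natCast, List.getD_eq_getElem matrix [] hrn]
    rw [hroweq]
    have hcin : ∀ ci ∈ PySem.List.pyRange 0 (matrix.length : Int) 1,
        pvInitCellL (pvMatGet matrix (rn : Int) ci)
        = pvInitCellL (PySem.List.pyGetD matrix[rn] ci 0) := by
      intro ci hci
      rw [PySem.List.mem_pyRange_one] at hci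
      obtain ⟨cn, hcn, hceq⟩ : ∃ cn : Nat, cn < matrix.length ∧ ci = (cn : Int) :=
        ⟨ci.toNat, by omega, by omega⟩
      subst hceq
      rw [matget matrix rn cn hrn (by rw [hlens rn hrn]; omega)]
      rw [PySem.List.pyGetD_natCast, List.getD_eq_getElem _ 0 (by rw [hlens rn hrn]; omega)]
    rw [List.map_congr_left hcin]
    rw [show (matrix.length : Int) = (matrix[rn].length : Int) by rw [hlens rn hrn]]
    rw [show (PySem.List.pyRange 0 (matrix[rn].length : Int) 1).map
          (fun ci => pvInitCellL (PySem.List.pyGetD matrix[rn] ci 0))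
        = ((PySem.List.pyRange 0 (matrix[rn].length : Int) 1).map
            (fun ci => PySem.List.pyGetD matrix[rn] ci 0)).map pvInitCellL by
      rw [List.map_map]; rfl]
    rw [PySem.List.map_pyGetD_pyRange_zero']
  rw [List.map_congr_left hin]
  rw [show (PySem.List.pyRange 0 (matrix.length : Int) 1).map
        (fun ri => (PySem.List.pyGetD matrix ri []).map pvInitCellL)
      = ((PySem.List.pyRange 0 (matrix.length : Int) 1).map
          (fun ri => PySem.List.pyGetD matrix ri [])).map (fun row => row.map pvInitCellL) by
    rw [List.map_map]; rfl]
  rw [PySem.List.map_pyGetD_pyRange_zero']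

theorem outer2 (matrix : List (List Int))
    (hpre : ∀ row ∈ matrix, row.length = matrix.length) :
    ∀ (k r : Nat), r + k = matrix.length →
    (PySem.List.pyRange (r : Int) (matrix.length : Int) 1).reverse.foldl
      (fun g row =>
        (PySem.List.pyRange 0 (matrix.length : Int) 1).reverse.foldl
          (fun g col =>
            if pvMatGet matrix row col == 1 then g
            else
              let g1 := if row < (matrix.length : Int) - 1 then
                  pvSet2 g row col (((pvCell g row col).modify "numZeroesBelow" 0
                    (· + (pvCell g (row + 1) col).getD "numZeroesBelow" 0)).items)
                else g
              let g2 := if col < (matrix.length : Int) - 1 then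
                  pvSet2 g1 row col (((pvCell g1 row col).modify "numZeroesRight" 0
                    (· + (pvCell g1 row (col + 1)).getD "numZeroesRight" 0)).items)
                else g1
              g2) g)
      (matrix.map (fun row => row.map pvInitCellL))
      = (matrix.map (fun row => row.map pvInitCellL)).take r
          ++ (refGrid matrix.length (matrix.drop r)).1 := by
  have hlens : ∀ i (h : i < matrix.length), matrix[i].length = matrix.length :=
    fun i h => hpre matrix[i] (List.getElem_mem h)
  intro k
  induction k with
  | zero =>
    intro r hr
    rw [PySem.List.pyRange_one_eq_nil (a := (r : Int)) (b := (matrix.length : Int)) (by omega)]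
    rw [List.drop_eq_nil_of_le (by omega)]
    simp only [refGrid, List.append_nil, List.reverse_nil, List.foldl_nil]
    rw [List.take_of_length_le (by rw [List.length_map]; omega)]
  | succ k ih =>
    intro r hr
    have hrN : r < matrix.length := by omega
    rw [PySem.List.pyRange_one_cons (a := (r : Int)) (b := (matrix.length : Int)) (by omega)]
    rw [List.reverse_cons, List.foldl_append]
    rw [show ((r : Int) + 1) = ((r + 1 : Nat) : Int) by push_cast; ring]
    rw [ih (r + 1) (by omega)]
    simp only [List.foldl_cons, List.foldl_nil]
    set I := matrix.map (fun row => row.map pvInitCellL) with hI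
    have hIlen : I.length = matrix.length := by rw [hI, List.length_map]
    set G1 := (refGrid matrix.length (matrix.drop (r + 1))).1 with hG1
    set below := (refGrid matrix.length (matrix.drop (r + 1))).2 with hbelowdef
    set g := I.take (r + 1) ++ G1 with hgdef
    have htk1 : (I.take (r + 1)).length = r + 1 := by
      rw [List.length_take]; omega
    have hG1len : G1.length = matrix.length - (r + 1) := by
      rw [hG1, refGrid_len_rows, List.length_drop]
    have hglen : g.length = matrix.length := by
      rw [hgdef, List.length_append, htk1, hG1len]; omega
    have hdropcons : matrix.drop r = matrix[r] :: matrix.drop (r + 1) :=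
      (List.getElem_cons_drop hrN).symm
    have hrowlen : matrix[r].length = matrix.length := hlens r hrN
    have hdrop1len : ∀ row ∈ matrix.drop (r + 1), row.length = matrix.length :=
      fun row hrow => hpre row (List.mem_of_mem_drop hrow)
    have hblen : below.length = matrix.length := by
      rw [hbelowdef]
      exact refGrid_len_snd _ _ hdrop1len
    have hgr : g[r]? = some (matrix[r].map pvInitCellL) := by
      rw [hgdef, List.getElem?_append_left (by omega)]
      rw [List.getElem?_take_of_lt (by omega), hI, List.getElem?_map,
        List.getElem?_eq_getElem hrN]
      rfl
    have hcl := colLoop matrix r matrix[r] below hrN hrowlen hblen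
      (fun c hc => by
        rw [matget matrix r c hrN (by omega), List.getD_eq_getElem _ 0 (by omega)])
      g hglen hgr
      (fun hrlt c hc => by
        -- row r+1 of g is the top row of G1
        have hr1N : r + 1 < matrix.length := by omega
        have hdropcons1 : matrix.drop (r + 1) = matrix[r + 1] :: matrix.drop (r + 2) :=
          (List.getElem_cons_drop hr1N).symm
        have hcells : G1 = (refRow matrix[r + 1] (refGrid matrix.length (matrix.drop (r + 2))).2).1
            :: (refGrid matrix.length (matrix.drop (r + 2))).1 := by
          rw [hG1, hdropcons1, refGrid_cons]
        have hbeloweq : below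
            = (refRow matrix[r + 1] (refGrid matrix.length (matrix.drop (r + 2))).2).2.1 := by
          rw [hbelowdef, hdropcons1, refGrid_cons]
        have hlen2 : (refGrid matrix.length (matrix.drop (r + 2))).2.length = matrix.length :=
          refGrid_len_snd _ _ (fun row hrow => hpre row (List.mem_of_mem_drop hrow))
        have hcellslen :
            (refRow matrix[r + 1] (refGrid matrix.length (matrix.drop (r + 2))).2).1.length
              = matrix.length := by
          rw [refRow_len_cells, hlens (r + 1) hr1N, hlen2]
          omega
        have hgr1 : g[r + 1]? = some
            (refRow matrix[r + 1] (refGrid matrix.length (matrix.drop (r + 2))).2).1 := by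
          rw [hgdef, List.getElem?_append_right (by omega), htk1, Nat.sub_self, hcells]
          rfl
        have hclen : c < (refRow matrix[r + 1] (refGrid matrix.length (matrix.drop (r + 2))).2).1.length := by
          rw [hcellslen]; omega
        have hcellc :
            (refRow matrix[r + 1] (refGrid matrix.length (matrix.drop (r + 2))).2).1[c]? = some
            ((refRow matrix[r + 1] (refGrid matrix.length (matrix.drop (r + 2))).2).1.getD c []) := by
          rw [List.getElem?_eq_getElem hclen, List.getD_eq_getElem _ [] hclen]
        rw [show ((r : Int) + 1) = ((r + 1 : Nat) : Int) by push_cast; ring]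
        rw [pvCell_eq2 _ (r + 1) c _ _ hgr1 hcellc]
        rw [refRow_getD_below _ _ c (by rw [hlens (r + 1) (by omega)]; omega) (by rw [hlen2]; omega)]
        rw [hbeloweq])
      (fun hge => by
        have hreq : r = matrix.length - 1 := by omega
        have : matrix.drop (r + 1) = [] := List.drop_eq_nil_of_le (by omega)
        rw [hbelowdef, this]
        simp [refGrid])
      matrix.length 0 (by omega)
    simp only [Nat.cast_zero, List.take_zero, List.drop_zero, List.nil_append] at hcl
    rw [hcl]
    -- assemble: (I.take (r+1) ++ G1).set r cs = I.take r ++ refGrid (drop r)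
    have hfinal : (refGrid matrix.length (matrix.drop r)).1
        = (refRow matrix[r] below).1 :: G1 := by
      rw [hdropcons, refGrid_cons, ← hbelowdef, ← hG1]
    rw [hfinal]
    rw [List.set_append_left _ _ (by omega)]
    have htkr : I.take (r + 1) = I.take r ++ [matrix[r].map pvInitCellL] := by
      rw [List.take_add_one, hI, List.getElem?_map, List.getElem?_eq_getElem hrN]
      rfl
    rw [htkr, List.set_append_right _ _ (by rw [List.length_take]; omega)]
    rw [show r - (I.take r).length = 0 by rw [List.length_take]; omega]
    simp

theorem A_eq_ref (matrix : List (List Int))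
    (h : ∀ row ∈ matrix, row.length = matrix.length) :
    precomputeNumOfZeroes matrix = (refGrid matrix.length matrix).1 := by
  simp only [precomputeNumOfZeroes]
  rw [grid2_fold matrix.length
      (fun row col =>
        ((PySem.Dict.empty.insert "numZeroesBelow"
            (if pvMatGet matrix row col == 0 then (1 : Int) else 0)).insert
          "numZeroesRight" (if pvMatGet matrix row col == 0 then (1 : Int) else 0)).items)
      matrix.length
      (matrix.map (fun row => row.map (fun _ => ([] : List (String × Int)))))
      (by rw [List.length_map])
      (by
        intro i hi
        simp only [List.getElem_map, List.length_map]
        exact h _ (List.getElem_mem _))]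
  rw [List.drop_eq_nil_of_le (by simp), List.append_nil]
  rw [init_map matrix h]
  have h2 := outer2 matrix h matrix.length 0 (by omega)
  simp only [Nat.cast_zero, List.take_zero, List.drop_zero, List.nil_append] at h2
  rw [h2]

-- ===== VERDICT (by name: the statement is the Claim_ definition above) =====
theorem precomputeNumOfZeroes_spec : Claim_equal_precomputeNumOfZeroes := by
  intro matrix _ hpre
  unfold Spec_precomputeNumOfZeroes
  rw [A_eq_ref matrix hpre, B_eq_ref matrix hpre]
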